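-- pv_equiv track=rewrite | github.com/dekuNukem/jekyll_test | _site/film_packaging/update_page.py | make_section
-- ===== SOURCE A (Python) =====
-- placeholder = '$%'
--
-- def make_section(text):
--     text = text.lstrip("#").replace('\r', '').replace('\n', '').strip()
--     link = text.lower().replace('.', '')
--     result = ''
--     for letter in link:
--         if letter.isalnum() or letter == '_':
--             result += letter
--         elif letter == '/':
--             result += placeholder
--         elif letter == '\'':
--             continue
--         else:
--             result += '-'
--     while '--' in result:
--         result = result.replace('--', '-')
--     result = result.strip('-')
--     result = result.replace(placeholder, '')
--     return f'- [{text}](#{result})'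
-- ===== SOURCE B (Python) =====
-- placeholder = '$%'
--
-- def make_section(text):
--     text = text.lstrip("#").replace('\r', '').replace('\n', '').strip()
--     pieces, cur = [], []
--     for ch in text:
--         ch = ch.lower()
--         if ch in ".'":
--             continue
--         if ch.isalnum() or ch == '_':
--             cur.append(ch)
--         elif ch == '/':
--             cur.append(placeholder)
--         else:
--             pieces.append(''.join(cur))
--             cur = []
--     pieces.append(''.join(cur))
--     anchor = '-'.join(p for p in pieces if p)
--     anchor = anchor.replace(placeholder, '')
--     return f'- [{text}](#{anchor})'
-- ===== Notes on version B (the rewrite author's own statement) =====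
-- stated objective: alternative
-- what changed: B builds the anchor by segmentation: it splits the heading into maximal runs of kept characters (lowercasing and skipping dots and apostrophes inline, a slash contributing the placeholder), drops empty runs and joins the rest with single dashes, so A's per-character dash emission, fixpoint while-loop collapsing double dashes and final dash-stripping all disappear.
import Mathlib
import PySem

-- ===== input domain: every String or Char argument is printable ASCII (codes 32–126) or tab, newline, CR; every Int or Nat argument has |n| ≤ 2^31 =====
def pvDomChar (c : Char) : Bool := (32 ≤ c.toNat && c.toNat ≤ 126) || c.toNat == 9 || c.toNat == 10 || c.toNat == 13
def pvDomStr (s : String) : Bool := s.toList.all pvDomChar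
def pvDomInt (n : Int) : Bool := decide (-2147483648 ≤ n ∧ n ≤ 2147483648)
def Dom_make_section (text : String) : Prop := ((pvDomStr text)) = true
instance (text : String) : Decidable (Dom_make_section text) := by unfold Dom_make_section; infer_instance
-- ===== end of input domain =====

-- B rebuilds the anchor by segmentation (maximal runs of kept characters, joined with single
-- dashes after dropping empty runs) instead of A's per-character dash emission followed by a
-- double-dash-collapsing while-loop and a final dash strip; same return value, different algorithm.

-- ===== PORT A =====

-- A's while-loop that replaces double dashes by single dashes until none remain; each iteration
-- that fires strictly shortens the string, so fuel = result.length is always sufficient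
def whileLoopA : Nat → List Char → List Char
  | 0, result => result
  | fuel + 1, result =>
    if PySem.Chars.isIn ['-', '-'] result then
      whileLoopA fuel (PySem.Chars.replace result ['-', '-'] ['-'])
    else result

def make_section (text : String) : String :=
  -- text.lstrip("#"): dropWhile over the single strip character '#' (exact)
  let text1 := PySem.Str.strip (PySem.Str.replace (PySem.Str.replace
      (String.ofList (text.toList.dropWhile (· == '#'))) "\r" "") "\n" "")
  let link := PySem.Str.replace (PySem.Str.lower text1) "." ""
  let result := link.toList.foldl (fun r letter =>
    if PySem.Chars.isalnum letter || letter == '_' then r ++ [letter]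
    else if letter == '/' then r ++ ['$', '%']          -- placeholder = '$%'
    else if letter == '\'' then r
    else r ++ ['-']) []
  let result := whileLoopA result.length result
  let result := PySem.Chars.stripChars result ['-']
  let result := PySem.Chars.replace result ['$', '%'] []
  "- [" ++ text1 ++ "](#" ++ String.ofList result ++ ")"

-- ===== PORT B =====

def make_section_alt (text : String) : String :=
  -- text.lstrip("#"): dropWhile over the single strip character '#' (exact)
  let text1 := PySem.Str.strip (PySem.Str.replace (PySem.Str.replace
      (String.ofList (text.toList.dropWhile (· == '#'))) "\r" "") "\n" "")
  -- one pass over the heading: lower each char, skip '.' and apostrophes, grow the current run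
  -- (placeholder '$%' for '/'), and close a run at every separator
  let st := text1.toList.foldl (fun (st : List (List Char) × List Char) letter =>
    let c := PySem.Chars.lowerChar letter
    if c == '.' || c == '\'' then st
    else if PySem.Chars.isalnum c || c == '_' then (st.1, st.2 ++ [c])
    else if c == '/' then (st.1, st.2 ++ ['$', '%'])    -- placeholder = '$%'
    else (st.1 ++ [st.2], [])) ([], [])
  let pieces := st.1 ++ [st.2]
  let anchor := PySem.Chars.join ['-'] (pieces.filter (fun p => !p.isEmpty))
  let anchor := PySem.Chars.replace anchor ['$', '%'] []
  "- [" ++ text1 ++ "](#" ++ String.ofList anchor ++ ")"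

-- ===== PRECONDITION & SPEC =====
def Spec_make_section (text : String) (out : String) : Prop := out = make_section_alt text
instance (text : String) (out : String) : Decidable (Spec_make_section text out) := by unfold Spec_make_section; infer_instance

-- ===== CLAIM (what is proved, stated in full; the proofs are below) =====
def Claim_equal_make_section : Prop := ∀ (text : String), Dom_make_section text → Spec_make_section text (make_section text)

-- ===== LEMMAS AND PROOFS =====

-- A's fold step and B's fold step, named for the proofs
def stepA (r : List Char) (letter : Char) : List Char :=
  if PySem.Chars.isalnum letter || letter == '_' then r ++ [letter]
  else if letter == '/' then r ++ ['$', '%']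
  else if letter == '\'' then r
  else r ++ ['-']

def stepB (st : List (List Char) × List Char) (letter : Char) : List (List Char) × List Char :=
  let c := PySem.Chars.lowerChar letter
  if c == '.' || c == '\'' then st
  else if PySem.Chars.isalnum c || c == '_' then (st.1, st.2 ++ [c])
  else if c == '/' then (st.1, st.2 ++ ['$', '%'])
  else (st.1 ++ [st.2], [])

-- canonical run-collapse: a maximal run of '-' becomes a single '-'
def collapse : List Char → List Char
  | [] => []
  | c :: t => if c = '-' ∧ t.head? = some '-' then collapse t else c :: collapse t

-- one pass of result.replace('--', '-') (leftmost, non-overlapping)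
def rep : List Char → List Char
  | [] => []
  | [c] => [c]
  | c :: d :: t => if c = '-' ∧ d = '-' then '-' :: rep t else c :: rep (d :: t)

def dp (c : Char) : Bool := c == '-'

-- right strip of dashes only
def rstripD (s : List Char) : List Char := (List.dropWhile dp s.reverse).reverse

theorem collapse_cons (c : Char) (t : List Char) :
    collapse (c :: t) = if c = '-' ∧ t.head? = some '-' then collapse t else c :: collapse t := rfl

theorem rep_head? (s : List Char) : (rep s).head? = s.head? := by
  match s with
  | [] => rfl
  | [c] => rfl
  | c :: d :: t => simp only [rep]; split_ifs with h <;> simp [h]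

theorem rep_length_le (s : List Char) : (rep s).length ≤ s.length := by
  match s with
  | [] => simp [rep]
  | [c] => simp [rep]
  | c :: d :: t =>
    simp only [rep]; split_ifs with h
    · have := rep_length_le t; simp; omega
    · have := rep_length_le (d :: t); simp at this ⊢; omega

theorem replace_go_eq_rep (fuel : Nat) (l acc : List Char) (h : l.length ≤ fuel) :
    PySem.Chars.replace.go ['-', '-'] ['-'] fuel l acc = acc.reverse ++ rep l := by
  induction fuel generalizing l acc with
  | zero =>
    have : l = [] := by simpa using h
    subst this
    simp [PySem.Chars.replace.go, rep]
  | succ fuel ih =>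
    match l with
    | [] => simp [PySem.Chars.replace.go, rep]
    | [c] =>
      simp only [PySem.Chars.replace.go]
      have : ['-', '-'].isPrefixOf [c] = false := by simp [List.isPrefixOf]
      rw [this]
      simp [ih [] (c :: acc) (by simp), rep]
    | c :: d :: t =>
      simp only [PySem.Chars.replace.go]
      by_cases hp : c = '-' ∧ d = '-'
      · obtain ⟨rfl, rfl⟩ := hp
        have : ['-', '-'].isPrefixOf ('-' :: '-' :: t) = true := by simp [List.isPrefixOf]
        rw [this]
        simp only [List.length, List.drop]
        rw [ih t _ (by simp at h; omega)]
        simp [rep]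
      · have : ['-', '-'].isPrefixOf (c :: d :: t) = false := by
          by_contra hcon
          simp only [Bool.not_eq_false, List.isPrefixOf] at hcon
          simp at hcon
          exact hp ⟨hcon.1.symm, hcon.2.symm⟩
        rw [this]
        rw [ih (d :: t) (c :: acc) (by simp at h ⊢; omega)]
        simp only [rep]
        rw [if_neg hp]
        simp

theorem replace_eq_rep (s : List Char) :
    PySem.Chars.replace s ['-', '-'] ['-'] = rep s := by
  simp only [PySem.Chars.replace]
  rw [if_neg (by simp)]
  simpa using replace_go_eq_rep s.length s [] le_rfl

theorem collapse_rep (s : List Char) : collapse (rep s) = collapse s := by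
  match s with
  | [] => rfl
  | [c] => rfl
  | c :: d :: t =>
    simp only [rep]
    split_ifs with h
    · obtain ⟨rfl, rfl⟩ := h
      have h1 : collapse ('-' :: '-' :: t) = collapse ('-' :: t) := by
        rw [collapse_cons]; simp
      rw [h1, collapse_cons, collapse_cons ('-' : Char) t, rep_head? t, collapse_rep t]
    · rw [collapse_cons, collapse_cons c (d :: t), rep_head? (d :: t), collapse_rep (d :: t)]
  termination_by s.length

theorem no_dd_collapse (s : List Char) (h : ¬ (['-', '-'] <:+: s)) : collapse s = s := by
  match s with
  | [] => rfl
  | [c] => simp [collapse]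
  | c :: d :: t =>
    have h2 : ¬ (['-', '-'] <:+: d :: t) := fun hi => h (List.infix_cons_iff.mpr (Or.inr hi))
    have h1 : ¬ (c = '-' ∧ d = '-') := by
      rintro ⟨rfl, rfl⟩
      exact h ⟨[], t, rfl⟩
    rw [collapse_cons, if_neg (by simpa using h1), no_dd_collapse (d :: t) h2]
  termination_by s.length

theorem rep_length_lt (s : List Char) (h : ['-', '-'] <:+: s) : (rep s).length < s.length := by
  match s with
  | [] => simp at h
  | [c] => exact absurd h.length_le (by simp)
  | c :: d :: t =>
    simp only [rep]
    split_ifs with hp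
    · have := rep_length_le t; simp; omega
    · have h2 : ['-', '-'] <:+: d :: t := by
        rcases List.infix_cons_iff.mp h with h1 | h1
        · obtain ⟨u, hu⟩ := h1
          rw [List.cons_append, List.cons_append] at hu
          injection hu with e1 hu2
          injection hu2 with e2 _
          exact absurd ⟨e1.symm, e2.symm⟩ hp
        · exact h1
      have := rep_length_lt (d :: t) h2
      simp at this ⊢; omega
  termination_by s.length

theorem whileLoopA_eq_collapse (fuel : Nat) (s : List Char) (h : s.length ≤ fuel) :
    whileLoopA fuel s = collapse s := by
  induction fuel generalizing s with
  | zero =>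
    have : s = [] := List.length_eq_zero_iff.mp (by omega)
    subst this; rfl
  | succ fuel ih =>
    simp only [whileLoopA]
    split_ifs with hin
    · have hinf : ['-', '-'] <:+: s := (PySem.Chars.isIn_iff_infix _ _).mp hin
      rw [replace_eq_rep, ih _ (by have := rep_length_lt s hinf; omega), collapse_rep]
    · exact (no_dd_collapse s ((PySem.Chars.isIn_eq_false_iff _ _).mp (by simpa using hin))).symm

-- str.replace(link, '.', '') deletes the dots: it is a filter
theorem replace_dot_go (fuel : Nat) (l acc : List Char) (h : l.length ≤ fuel) :
    PySem.Chars.replace.go ['.'] [] fuel l acc = acc.reverse ++ l.filter (fun c => c != '.') := by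
  induction fuel generalizing l acc with
  | zero =>
    have : l = [] := by simpa using h
    subst this; simp [PySem.Chars.replace.go]
  | succ fuel ih =>
    match l with
    | [] => simp [PySem.Chars.replace.go]
    | c :: t =>
      simp only [PySem.Chars.replace.go]
      by_cases hc : c = '.'
      · subst hc
        have : ['.'].isPrefixOf ('.' :: t) = true := by simp [List.isPrefixOf]
        rw [this]
        simp only [List.length, List.drop, List.reverse_nil, List.nil_append, if_true]
        rw [ih t acc (by simp at h; omega)]
        simp
      · have : ['.'].isPrefixOf (c :: t) = false := by
          simp [List.isPrefixOf]; exact fun e => hc e.symm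
        rw [this, ih t (c :: acc) (by simp at h; omega)]
        simp [hc]

theorem replace_dot (s : List Char) :
    PySem.Chars.replace s ['.'] [] = s.filter (fun c => c != '.') := by
  simp only [PySem.Chars.replace]
  rw [if_neg (by simp)]
  simpa using replace_dot_go s.length s [] le_rfl

-- intercalate bookkeeping
theorem inter_cons_cons (a b : List Char) (xs : List (List Char)) :
    List.intercalate ['-'] (a :: b :: xs) = a ++ '-' :: List.intercalate ['-'] (b :: xs) := by
  simp [List.intercalate, List.intersperse]

theorem inter_singleton (a : List Char) : List.intercalate ['-'] [a] = a := by
  simp [List.intercalate]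

theorem inter_cons_eq_append (x : List Char) (xs : List (List Char)) :
    ∃ Y, List.intercalate ['-'] (x :: xs) = x ++ Y := by
  cases xs with
  | nil => exact ⟨[], by rw [inter_singleton]; simp⟩
  | cons b t => exact ⟨'-' :: List.intercalate ['-'] (b :: t), inter_cons_cons x b t⟩

theorem inter_snoc_append (xs : List (List Char)) (y z : List Char) :
    List.intercalate ['-'] (xs ++ [y ++ z]) = List.intercalate ['-'] (xs ++ [y]) ++ z := by
  induction xs with
  | nil => simp [inter_singleton]
  | cons a xs ih =>
    cases xs with
    | nil => simp [inter_cons_cons, inter_singleton, List.append_assoc]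
    | cons b t =>
      simp only [List.cons_append] at ih ⊢
      rw [inter_cons_cons, inter_cons_cons, ih]
      simp

theorem inter_snoc_nil (xs : List (List Char)) (h : xs ≠ []) :
    List.intercalate ['-'] (xs ++ [[]]) = List.intercalate ['-'] xs ++ ['-'] := by
  induction xs with
  | nil => exact absurd rfl h
  | cons a xs ih =>
    cases xs with
    | nil => simp [inter_cons_cons, inter_singleton]
    | cons b t =>
      simp only [List.cons_append] at ih ⊢
      rw [inter_cons_cons, inter_cons_cons, ih (by simp)]
      simp

-- the fold correspondence: A's dash-emitting fold over the lowered, dot-free text is exactly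
-- the dash-join of the pieces B's fold accumulates
theorem foldAB (l : List Char) (pieces : List (List Char)) (cur : List Char) :
    ((l.map PySem.Chars.lowerChar).filter (fun c => c != '.')).foldl stepA
        (List.intercalate ['-'] (pieces ++ [cur]))
      = List.intercalate ['-']
          ((l.foldl stepB (pieces, cur)).1 ++ [(l.foldl stepB (pieces, cur)).2]) := by
  induction l generalizing pieces cur with
  | nil => rfl
  | cons ch l ih =>
    simp only [List.map_cons, List.foldl_cons]
    set c := PySem.Chars.lowerChar ch with hc
    by_cases h1 : c = '.'
    · have : (c != '.') = false := by simp [h1]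
      rw [List.filter_cons_of_neg (by simp [this])]
      have hB : stepB (pieces, cur) ch = (pieces, cur) := by
        simp [stepB, ← hc, h1]
      rw [hB]; exact ih pieces cur
    · rw [List.filter_cons_of_pos (by simp [h1])]
      simp only [List.foldl_cons]
      by_cases h2 : PySem.Chars.isalnum c || c == '_'
      · have hA : stepA (List.intercalate ['-'] (pieces ++ [cur])) c
            = List.intercalate ['-'] (pieces ++ [cur ++ [c]]) := by
          simp only [stepA, if_pos h2]
          exact (inter_snoc_append pieces cur [c]).symm
        have hq : c ≠ '\'' := by
          intro he
          rcases Bool.or_eq_true_iff.mp h2 with h' | h'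
          · rw [he] at h'; revert h'; decide
          · rw [beq_iff_eq, he] at h'; exact absurd h' (by decide)
        have hB : stepB (pieces, cur) ch = (pieces, cur ++ [c]) := by
          simp only [stepB, ← hc]
          rw [if_neg (by simp [h1, hq]), if_pos h2]
        rw [hA, hB]; exact ih pieces (cur ++ [c])
      · by_cases h3 : c = '/'
        · have hA : stepA (List.intercalate ['-'] (pieces ++ [cur])) c
              = List.intercalate ['-'] (pieces ++ [cur ++ ['$', '%']]) := by
            simp only [stepA, if_neg h2, if_pos (show (c == '/') = true by simp [h3])]
            exact (inter_snoc_append pieces cur ['$', '%']).symm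
          have hB : stepB (pieces, cur) ch = (pieces, cur ++ ['$', '%']) := by
            simp only [stepB, ← hc]
            rw [if_neg (by simp [h3]), if_neg h2,
                if_pos (show (c == '/') = true by simp [h3])]
          rw [hA, hB]; exact ih pieces (cur ++ ['$', '%'])
        · by_cases h4 : c = '\''
          · have hA : stepA (List.intercalate ['-'] (pieces ++ [cur])) c
                = List.intercalate ['-'] (pieces ++ [cur]) := by
              simp only [stepA, if_neg h2,
                if_neg (show ¬ (c == '/') = true by simp [h3]),
                if_pos (show (c == '\'') = true by simp [h4])]
            have hB : stepB (pieces, cur) ch = (pieces, cur) := by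
              simp [stepB, ← hc, h4]
            rw [hA, hB]; exact ih pieces cur
          · have hA : stepA (List.intercalate ['-'] (pieces ++ [cur])) c
                = List.intercalate ['-'] ((pieces ++ [cur]) ++ [[]]) := by
              simp only [stepA, if_neg h2,
                if_neg (show ¬ (c == '/') = true by simp [h3]),
                if_neg (show ¬ (c == '\'') = true by simp [h4])]
              exact (inter_snoc_nil (pieces ++ [cur]) (by simp)).symm
            have hB : stepB (pieces, cur) ch = (pieces ++ [cur], []) := by
              simp only [stepB, ← hc]
              rw [if_neg (by simp [h1, h4]), if_neg h2,
                  if_neg (show ¬ (c == '/') = true by simp [h3])]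
            rw [hA, hB]
            exact ih (pieces ++ [cur]) []

-- every piece B accumulates is dash-free
theorem foldB_dashfree (l : List Char) (pieces : List (List Char)) (cur : List Char)
    (h : ∀ p ∈ pieces ++ [cur], ('-' : Char) ∉ p) :
    ∀ p ∈ (l.foldl stepB (pieces, cur)).1 ++ [(l.foldl stepB (pieces, cur)).2],
      ('-' : Char) ∉ p := by
  induction l generalizing pieces cur with
  | nil => exact h
  | cons ch l ih =>
    simp only [List.foldl_cons]
    set c := PySem.Chars.lowerChar ch with hc
    have hcur : ('-' : Char) ∉ cur := h cur (by simp)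
    have hpieces : ∀ p ∈ pieces, ('-' : Char) ∉ p := fun p hp => h p (by simp [hp])
    simp only [stepB, ← hc]
    split_ifs with g1 g2 g3
    · exact ih pieces cur h
    · refine ih pieces (cur ++ [c]) ?_
      intro p hp
      rcases List.mem_append.mp hp with hp | hp
      · exact hpieces p hp
      · simp at hp; subst hp
        intro hm
        rcases List.mem_append.mp hm with hm | hm
        · exact hcur hm
        · simp at hm
          rw [← hm] at g2
          revert g2; decide
    · refine ih pieces (cur ++ ['$', '%']) ?_
      intro p hp
      rcases List.mem_append.mp hp with hp | hp
      · exact hpieces p hp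
      · simp at hp; subst hp
        intro hm
        rcases List.mem_append.mp hm with hm | hm
        · exact hcur hm
        · simp at hm
    · refine ih (pieces ++ [cur]) [] ?_
      intro p hp
      rcases List.mem_append.mp hp with hp | hp
      · rcases List.mem_append.mp hp with hp | hp
        · exact hpieces p hp
        · simp at hp; subst hp; exact hcur
      · simp at hp; subst hp; simp

-- dash-free prefixes pass through collapse
theorem collapse_dashfree_prefix (p s : List Char) (h : ('-' : Char) ∉ p) :
    collapse (p ++ s) = p ++ collapse s := by
  induction p with
  | nil => rfl
  | cons a p ih =>
    have ha : a ≠ '-' := fun e => h (by simp [e])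
    rw [List.cons_append, collapse_cons, if_neg (by rintro ⟨e, -⟩; exact ha e),
        ih (fun hm => h (by simp [hm]))]
    rfl

theorem collapse_dashfree (p : List Char) (h : ('-' : Char) ∉ p) : collapse p = p := by
  have := collapse_dashfree_prefix p [] h
  simpa [collapse] using this

-- dropWhile over an append whose right part is all non-matching
theorem dropWhile_append_nodash (u v : List Char) (hv : ∀ c ∈ v, dp c = false) :
    List.dropWhile dp (u ++ v) = List.dropWhile dp u ++ v := by
  induction u with
  | nil =>
    simp only [List.nil_append, List.dropWhile_nil]
    cases v with
    | nil => rfl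
    | cons c t => rw [List.dropWhile_cons_of_neg (by simp [hv c (by simp)])]
  | cons a u ih =>
    by_cases ha : dp a
    · rw [List.cons_append, List.dropWhile_cons_of_pos ha, List.dropWhile_cons_of_pos ha, ih]
    · rw [List.cons_append, List.dropWhile_cons_of_neg (by simpa using ha),
          List.dropWhile_cons_of_neg (by simpa using ha)]
      rfl

-- stripChars with ['-'] in terms of dp
theorem stripChars_dash (s : List Char) :
    PySem.Chars.stripChars s ['-'] =
      (List.dropWhile dp (List.dropWhile dp s).reverse).reverse := by
  have hp : (fun c => (['-'] : List Char).contains c) = dp := by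
    funext c; by_cases h : c = '-' <;> simp [dp, h]
  simp only [PySem.Chars.stripChars, hp]

theorem strip_cons_dash (s : List Char) :
    PySem.Chars.stripChars ('-' :: s) ['-'] = PySem.Chars.stripChars s ['-'] := by
  rw [stripChars_dash, stripChars_dash, List.dropWhile_cons_of_pos (by simp [dp])]

theorem strip_nodash (s : List Char) (h : ('-' : Char) ∉ s) :
    PySem.Chars.stripChars s ['-'] = s := by
  have hall : ∀ c ∈ s, dp c = false := by
    intro c hc; simp only [dp, beq_eq_false_iff_ne]; rintro rfl; exact h hc
  have h1 : List.dropWhile dp s = s := by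
    have := dropWhile_append_nodash [] s hall
    simpa using this
  have h2 : List.dropWhile dp s.reverse = s.reverse := by
    have := dropWhile_append_nodash [] s.reverse (fun c hc => hall c (List.mem_reverse.mp hc))
    simpa using this
  rw [stripChars_dash, h1, h2, List.reverse_reverse]

theorem strip_append_left (p x : List Char) (hp : p ≠ []) (h : ('-' : Char) ∉ p) :
    PySem.Chars.stripChars (p ++ x) ['-'] = p ++ rstripD x := by
  obtain ⟨a, p', rfl⟩ := List.exists_cons_of_ne_nil hp
  have ha : dp a = false := by
    simp only [dp, beq_eq_false_iff_ne]; rintro rfl; exact h (by simp)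
  rw [stripChars_dash]
  rw [show (a :: p') ++ x = a :: (p' ++ x) from rfl, List.dropWhile_cons_of_neg (by simp [ha])]
  have hnp : ∀ c ∈ (a :: p').reverse, dp c = false := by
    intro c hc
    simp only [dp, beq_eq_false_iff_ne]; rintro rfl
    exact h (List.mem_reverse.mp hc)
  rw [show a :: (p' ++ x) = (a :: p') ++ x from rfl, List.reverse_append,
      dropWhile_append_nodash _ _ hnp, List.reverse_append, List.reverse_reverse]
  rfl

theorem rstripD_cons_dash (X : List Char) (h : rstripD X ≠ []) :
    rstripD ('-' :: X) = '-' :: rstripD X := by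
  simp only [rstripD] at *
  rw [List.reverse_cons, List.dropWhile_append]
  have : (List.dropWhile dp X.reverse).isEmpty = false := by
    cases hX : List.dropWhile dp X.reverse with
    | nil => rw [hX] at h; simp at h
    | cons a t => simp
  rw [if_neg (by simp [this])]
  simp

theorem rstripD_single_dash : rstripD ['-'] = [] := by decide

-- first survivor of dropWhile fails the predicate
theorem dropWhile_head_false {α : Type} (p : α → Bool) (l : List α) (x : α) (xs : List α)
    (h : l.dropWhile p = x :: xs) : p x = false := by
  induction l with
  | nil => simp at h
  | cons a t ih =>
    by_cases ha : p a
    · rw [List.dropWhile_cons_of_pos ha] at h; exact ih h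
    · rw [List.dropWhile_cons_of_neg ha] at h
      injection h with h1 _
      rw [← h1]
      simpa using ha

-- collapse of a dash followed by a join: leading empty pieces are absorbed
theorem lead_dash_all_empty (rest : List (List Char))
    (h : ∀ p ∈ rest, p = ([] : List Char)) :
    collapse ('-' :: List.intercalate ['-'] rest) = ['-'] := by
  induction rest with
  | nil => decide
  | cons p t ih =>
    have hp : p = [] := h p (by simp)
    subst hp
    cases t with
    | nil => decide
    | cons q t' =>
      rw [inter_cons_cons, List.nil_append, collapse_cons, if_pos (by simp)]
      exact ih (fun p hp => h p (by simp [hp]))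

theorem lead_dash_drop (rest : List (List Char))
    (hdf : ∀ p ∈ rest, ('-' : Char) ∉ p)
    (h : rest.dropWhile (fun p => p.isEmpty) ≠ []) :
    collapse ('-' :: List.intercalate ['-'] rest)
      = '-' :: collapse (List.intercalate ['-'] (rest.dropWhile (fun p => p.isEmpty))) := by
  induction rest with
  | nil => simp at h
  | cons p t ih =>
    by_cases hp : p = []
    · subst hp
      rw [List.dropWhile_cons_of_pos (by simp)] at h ⊢
      cases t with
      | nil => simp at h
      | cons q t' =>
        rw [inter_cons_cons, List.nil_append, collapse_cons, if_pos (by simp)]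
        exact ih (fun p hp => hdf p (by simp [hp])) h
    · rw [List.dropWhile_cons_of_neg (by simp [hp])]
      obtain ⟨a, p', rfl⟩ := List.exists_cons_of_ne_nil hp
      have hane : a ≠ '-' := fun he => hdf (a :: p') (by simp) (by simp [he])
      cases t with
      | nil =>
        rw [inter_singleton, collapse_cons]
        rw [if_neg (by rintro ⟨-, he⟩; simp at he; exact hane he)]
      | cons q t' =>
        rw [inter_cons_cons, collapse_cons]
        rw [if_neg (by rintro ⟨-, he⟩; simp at he; exact hane he)]

theorem filter_dropWhile_empty (rest : List (List Char)) :
    (rest.dropWhile (fun p => p.isEmpty)).filter (fun p => !p.isEmpty)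
      = rest.filter (fun p => !p.isEmpty) := by
  induction rest with
  | nil => rfl
  | cons p t ih =>
    by_cases hp : p = []
    · subst hp
      rw [List.dropWhile_cons_of_pos (by simp), ih, List.filter_cons_of_neg (by simp)]
    · rw [List.dropWhile_cons_of_neg (by simp [hp])]

-- the main lemma: strip('-') of the collapsed dash-join is the dash-join of the nonempty pieces
theorem strip_collapse_join (P : List (List Char)) (hdf : ∀ p ∈ P, ('-' : Char) ∉ p) :
    PySem.Chars.stripChars (collapse (List.intercalate ['-'] P)) ['-']
      = List.intercalate ['-'] (P.filter (fun p => !p.isEmpty)) := by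
  match P with
  | [] => decide
  | [p] =>
    by_cases hp : p = []
    · subst hp; decide
    · rw [inter_singleton, collapse_dashfree p (hdf p (by simp)),
          strip_nodash p (hdf p (by simp)), List.filter_cons_of_pos (by simpa using hp),
          List.filter_nil, inter_singleton]
  | p :: q :: t =>
    have hdfr : ∀ r ∈ q :: t, ('-' : Char) ∉ r := fun r hr => hdf r (by simp at hr ⊢; tauto)
    by_cases hp : p = []
    · subst hp
      rw [inter_cons_cons, List.nil_append]
      by_cases hdw : (q :: t).dropWhile (fun p => p.isEmpty) = []
      · rw [lead_dash_all_empty _ (by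
          intro r hr
          have := List.dropWhile_eq_nil_iff.mp hdw r hr
          simpa using this)]
        have hfil : (q :: t).filter (fun p => !p.isEmpty) = [] := by
          apply List.filter_eq_nil_iff.mpr
          intro r hr
          have := List.dropWhile_eq_nil_iff.mp hdw r hr
          simpa using this
        rw [show ((([] : List Char) :: q :: t).filter (fun p => !p.isEmpty))
              = (q :: t).filter (fun p => !p.isEmpty) from List.filter_cons_of_neg (by simp),
            hfil]
        decide
      · rw [lead_dash_drop _ hdfr hdw, strip_cons_dash]
        have hrec := strip_collapse_join ((q :: t).dropWhile (fun p => p.isEmpty))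
          (fun r hr => hdfr r ((List.dropWhile_sublist _).subset hr))
        rw [hrec, filter_dropWhile_empty,
            show ((([] : List Char) :: q :: t).filter (fun p => !p.isEmpty))
              = (q :: t).filter (fun p => !p.isEmpty) from List.filter_cons_of_neg (by simp)]
    · have hne : ('-' : Char) ∉ p := hdf p (by simp)
      rw [inter_cons_cons, collapse_dashfree_prefix p _ hne, strip_append_left p _ hp hne,
          List.filter_cons_of_pos (by simpa using hp)]
      by_cases hdw : (q :: t).dropWhile (fun p => p.isEmpty) = []
      · rw [lead_dash_all_empty _ (by
          intro r hr
          have := List.dropWhile_eq_nil_iff.mp hdw r hr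
          simpa using this), rstripD_single_dash]
        have hfil : (q :: t).filter (fun p => !p.isEmpty) = [] := by
          apply List.filter_eq_nil_iff.mpr
          intro r hr
          have := List.dropWhile_eq_nil_iff.mp hdw r hr
          simpa using this
        rw [hfil, inter_singleton]
        simp
      · rw [lead_dash_drop _ hdfr hdw]
        obtain ⟨r0, rt, hr0⟩ := List.exists_cons_of_ne_nil hdw
        have hr0head : r0.isEmpty = false := dropWhile_head_false _ _ _ _ hr0
        have hr0ne : r0 ≠ [] := by intro e; rw [e] at hr0head; simp at hr0head
        have hrec := strip_collapse_join ((q :: t).dropWhile (fun p => p.isEmpty))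
          (fun r hr => hdfr r ((List.dropWhile_sublist _).subset hr))
        rw [filter_dropWhile_empty] at hrec
        obtain ⟨a, r0', rfl⟩ := List.exists_cons_of_ne_nil hr0ne
        have hr0df : ('-' : Char) ∉ (a :: r0') :=
          hdfr _ ((List.dropWhile_sublist _).subset (by rw [hr0]; simp))
        have ha : a ≠ '-' := fun e => hr0df (by simp [e])
        obtain ⟨Y, hY⟩ := inter_cons_eq_append (a :: r0') rt
        have hXfm : collapse (List.intercalate ['-'] ((q :: t).dropWhile (fun p => p.isEmpty)))
            = a :: (r0' ++ collapse Y) := by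
          rw [hr0, hY, collapse_dashfree_prefix _ _ hr0df]
          rfl
        have hstripX : PySem.Chars.stripChars
              (collapse (List.intercalate ['-'] ((q :: t).dropWhile (fun p => p.isEmpty)))) ['-']
            = rstripD (collapse (List.intercalate ['-'] ((q :: t).dropWhile (fun p => p.isEmpty)))) := by
          rw [stripChars_dash, rstripD, hXfm,
              List.dropWhile_cons_of_neg (by simp [dp, ha])]
        have hfilne : (q :: t).filter (fun p => !p.isEmpty)
            = (a :: r0') :: rt.filter (fun p => !p.isEmpty) := by
          rw [← filter_dropWhile_empty, hr0, List.filter_cons_of_pos (by simp [hr0head])]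
        have hXne : rstripD (collapse (List.intercalate ['-']
              ((q :: t).dropWhile (fun p => p.isEmpty)))) ≠ [] := by
          rw [← hstripX, hrec, hfilne]
          obtain ⟨Z, hZ⟩ := inter_cons_eq_append (a :: r0') (rt.filter (fun p => !p.isEmpty))
          rw [hZ]
          simp
        rw [rstripD_cons_dash _ hXne, ← hstripX, hrec, hfilne, inter_cons_cons]
  termination_by P.length
  decreasing_by
    all_goals
      have hsub : (List.dropWhile (fun p : List Char => p.isEmpty) (q :: t)).length ≤ (q :: t).length :=
        (List.dropWhile_sublist _).length_le
      simp only [List.length_cons] at hsub ⊢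
      omega

-- ===== VERDICT (by name: the statement is the Claim_ definition above) =====
theorem make_section_spec : Claim_equal_make_section := by
  intro text _
  show make_section text = make_section_alt text
  simp only [make_section, make_section_alt]
  set text1 := PySem.Str.strip (PySem.Str.replace (PySem.Str.replace
      (String.ofList (text.toList.dropWhile (· == '#'))) "\r" "") "\n" "") with ht1
  have hlink : (PySem.Str.replace (PySem.Str.lower text1) "." "").toList
      = (text1.toList.map PySem.Chars.lowerChar).filter (fun c => c != '.') := by
    rw [PySem.Str.toList_replace]
    simp only [PySem.Str.toList_lower]
    have h1 : ("." : String).toList = ['.'] := by decide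
    have h2 : ("" : String).toList = [] := by decide
    rw [h1, h2, replace_dot, PySem.Chars.lower]
  have hfoldA : ∀ (l : List Char) (r : List Char), l.foldl (fun r letter =>
      if PySem.Chars.isalnum letter || letter == '_' then r ++ [letter]
      else if letter == '/' then r ++ ['$', '%']
      else if letter == '\'' then r
      else r ++ ['-']) r = l.foldl stepA r := by
    intro l r; rfl
  have hfoldB : ∀ (l : List Char) (st : List (List Char) × List Char), l.foldl
      (fun (st : List (List Char) × List Char) letter =>
        let c := PySem.Chars.lowerChar letter
        if c == '.' || c == '\'' then st
        else if PySem.Chars.isalnum c || c == '_' then (st.1, st.2 ++ [c])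
        else if c == '/' then (st.1, st.2 ++ ['$', '%'])
        else (st.1 ++ [st.2], [])) st = l.foldl stepB st := by
    intro l st; rfl
  rw [hlink, hfoldA, hfoldB]
  have hAB := foldAB text1.toList [] []
  have h0 : List.intercalate ['-'] (([] : List (List Char)) ++ [[]]) = [] := by decide
  rw [h0] at hAB
  rw [hAB, whileLoopA_eq_collapse _ _ le_rfl]
  rw [strip_collapse_join _ (foldB_dashfree text1.toList [] [] (by simp))]
  simp only [PySem.Chars.join]
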